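-- pv_equiv track=rewrite | github.com/makhmudgaly/leetcode-solutions | 2903-find-indices-with-index-and-value-difference-i/2903-find-indices-with-index-and-value-difference-i.py | findIndices
-- ===== SOURCE A (Python) =====
-- from typing import List
--
-- def findIndices(nums: List[int], indexDifference: int, valueDifference: int) -> List[int]:
--     for i, num1 in enumerate(nums):
--         for j, num2 in enumerate(nums):
--             idxDiff = abs(i - j)
--             valDiff = abs(num1 - num2)
--             if idxDiff >= indexDifference and valDiff >= valueDifference:
--                 return [i, j]
--
--     return [-1, -1]
-- ===== SOURCE B (Python) =====
-- from typing import List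
--
-- def _first_partner(nums: List[int], i: int, indexDifference: int, valueDifference: int) -> int:
--     ai = nums[i]
--     for j, aj in enumerate(nums):
--         if abs(i - j) >= indexDifference and abs(ai - aj) >= valueDifference:
--             return j
--     return -1
--
-- def findIndices(nums: List[int], indexDifference: int, valueDifference: int) -> List[int]:
--     n = len(nums)
--     d = max(indexDifference, 0)
--     # suf[k] = (min(nums[k:]), max(nums[k:])), filled right-to-left
--     suf = [None] * n
--     for k in range(n - 1, -1, -1):
--         lo, hi = nums[k], nums[k]
--         if k + 1 < n:
--             lo, hi = min(lo, suf[k + 1][0]), max(hi, suf[k + 1][1])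
--         suf[k] = (lo, hi)
--     pre = None  # extremes of the left window nums[0 : i - d + 1]
--     for i, ai in enumerate(nums):
--         if i - d >= 0:
--             x = nums[i - d]
--             pre = (x, x) if pre is None else (min(pre[0], x), max(pre[1], x))
--         ok = pre is not None and (ai - pre[0] >= valueDifference or pre[1] - ai >= valueDifference)
--         if not ok and i + d < n:
--             lo, hi = suf[i + d]
--             ok = ai - lo >= valueDifference or hi - ai >= valueDifference
--         if ok:
--             return [i, _first_partner(nums, i, indexDifference, valueDifference)]
--     return [-1, -1]
-- ===== Notes on version B (the rewrite author's own statement) =====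
-- stated objective: faster
-- what changed: Replaces A's all-pairs double scan with prefix/suffix min-max extremes giving an O(1) existence test per index, so the first valid i is found in one O(n) pass and its smallest partner j is then located by a single linear scan.
import Mathlib
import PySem

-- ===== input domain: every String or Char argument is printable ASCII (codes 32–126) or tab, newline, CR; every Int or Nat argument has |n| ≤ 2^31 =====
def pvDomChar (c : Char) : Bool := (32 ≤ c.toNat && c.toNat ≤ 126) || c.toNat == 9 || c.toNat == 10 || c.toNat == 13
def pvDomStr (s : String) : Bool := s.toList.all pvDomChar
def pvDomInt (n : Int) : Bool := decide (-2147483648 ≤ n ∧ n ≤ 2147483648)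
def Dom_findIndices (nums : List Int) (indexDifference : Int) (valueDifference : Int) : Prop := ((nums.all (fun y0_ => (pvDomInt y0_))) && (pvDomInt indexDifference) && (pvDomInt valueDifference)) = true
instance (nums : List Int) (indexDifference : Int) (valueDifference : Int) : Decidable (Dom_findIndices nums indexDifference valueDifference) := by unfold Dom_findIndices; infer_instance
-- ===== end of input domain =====

-- B replaces A's O(n^2) all-pairs scan: prefix/suffix min-max extremes give an O(1)
-- existence test per index i, then one linear scan locates the smallest partner j (objective: faster).

-- ===== PORT A =====
-- inner 'for j, num2 in enumerate(nums): … return [i, j]'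
def innerA (i num1 indexDifference valueDifference : Int) : List (Int × Int) → Option (List Int)
  | [] => none
  | (j, num2) :: rest =>
      if |i - j| ≥ indexDifference ∧ |num1 - num2| ≥ valueDifference then some [i, j]
      else innerA i num1 indexDifference valueDifference rest

-- outer 'for i, num1 in enumerate(nums)'
def outerA (nums : List Int) (indexDifference valueDifference : Int) : List (Int × Int) → List Int
  | [] => [-1, -1]
  | (i, num1) :: rest =>
      match innerA i num1 indexDifference valueDifference (PySem.List.enumerate nums 0) with
      | some r => r
      | none => outerA nums indexDifference valueDifference rest

def findIndices (nums : List Int) (indexDifference : Int) (valueDifference : Int) : List Int :=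
  outerA nums indexDifference valueDifference (PySem.List.enumerate nums 0)

-- ===== PORT B =====
-- Source B fills suf right-to-left (for k in range(n-1,-1,-1)); the same accumulation as structural recursion
def sufB : List Int → List (Int × Int)
  | [] => []
  | x :: xs =>
      match sufB xs with
      | [] => [(x, x)]
      | (mn, mx) :: rest => (min x mn, max x mx) :: (mn, mx) :: rest

-- '_first_partner': 'for j, aj in enumerate(nums): … return j' / 'return -1'
def fpB (i ai indexDifference valueDifference : Int) : List (Int × Int) → Int
  | [] => -1
  | (j, aj) :: rest =>
      if |i - j| ≥ indexDifference ∧ |ai - aj| ≥ valueDifference then j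
      else fpB i ai indexDifference valueDifference rest

def firstPartner (nums : List Int) (i indexDifference valueDifference : Int) : Int :=
  fpB i (PySem.List.pyGetD nums i 0) indexDifference valueDifference (PySem.List.enumerate nums 0)

-- main 'for i, ai in enumerate(nums)' with running prefix extremes 'pre'
def loopB (nums : List Int) (suf : List (Int × Int)) (indexDifference v d : Int) :
    List (Int × Int) → Option (Int × Int) → List Int
  | [], _ => [-1, -1]
  | (i, ai) :: rest, pre =>
      let pre' : Option (Int × Int) :=
        if i - d ≥ 0 then
          let x := PySem.List.pyGetD nums (i - d) 0
          match pre with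
          | none => some (x, x)
          | some (p, q) => some (min p x, max q x)
        else pre
      let ok1 : Bool :=
        match pre' with
        | none => false
        | some (p, q) => decide (ai - p ≥ v) || decide (q - ai ≥ v)
      let ok : Bool := ok1 ||
        (decide (i + d < (nums.length : Int)) &&
          (let sp := PySem.List.pyGetD suf (i + d) (0, 0)
           decide (ai - sp.1 ≥ v) || decide (sp.2 - ai ≥ v)))
      if ok then [i, firstPartner nums i indexDifference v]
      else loopB nums suf indexDifference v d rest pre'

def findIndices_alt (nums : List Int) (indexDifference : Int) (valueDifference : Int) : List Int :=
  let d : Int := max indexDifference 0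
  loopB nums (sufB nums) indexDifference valueDifference d (PySem.List.enumerate nums 0) none

-- ===== PRECONDITION & SPEC =====
def Spec_findIndices (nums : List Int) (indexDifference : Int) (valueDifference : Int) (out : List Int) : Prop := out = findIndices_alt nums indexDifference valueDifference
instance (nums : List Int) (indexDifference : Int) (valueDifference : Int) (out : List Int) : Decidable (Spec_findIndices nums indexDifference valueDifference out) := by unfold Spec_findIndices; infer_instance

-- ===== CLAIM (what is proved, stated in full; the proofs are below) =====
def Claim_equal_findIndices : Prop := ∀ (nums : List Int) (indexDifference : Int) (valueDifference : Int), Dom_findIndices nums indexDifference valueDifference → Spec_findIndices nums indexDifference valueDifference (findIndices nums indexDifference valueDifference)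

-- ===== LEMMAS AND PROOFS =====

-- extremes of a list, for specifying pre/suf windows
def extMM : List Int → Option (Int × Int)
  | [] => none
  | x :: xs => some (xs.foldl min x, xs.foldl max x)

theorem innerA_ne_none_fp (i a dI v : Int) (l : List (Int × Int)) :
    innerA i a dI v l ≠ none → innerA i a dI v l = some [i, fpB i a dI v l] := by
  induction l with
  | nil => intro h; exact absurd rfl h
  | cons p rest ih =>
      obtain ⟨j, aj⟩ := p
      intro h
      by_cases hc : |i - j| ≥ dI ∧ |a - aj| ≥ v
      · simp [innerA, fpB, hc]
      · simp only [innerA, fpB, if_neg hc] at h ⊢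
        exact ih h

theorem innerA_eq_none_iff (i a dI v : Int) (l : List (Int × Int)) :
    innerA i a dI v l = none ↔ ∀ p ∈ l, ¬(|i - p.1| ≥ dI ∧ |a - p.2| ≥ v) := by
  induction l with
  | nil => simp [innerA]
  | cons p rest ih =>
      obtain ⟨j, aj⟩ := p
      simp only [innerA]
      by_cases h : |i - j| ≥ dI ∧ |a - aj| ≥ v
      · simp [h]
      · rw [if_neg h, ih]
        constructor
        · intro hall p hp
          rcases List.mem_cons.mp hp with rfl | hp
          · exact h
          · exact hall p hp
        · intro hall p hp
          exact hall p (List.mem_cons_of_mem _ hp)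

theorem extMM_eq_none_iff (xs : List Int) : extMM xs = none ↔ xs = [] := by
  cases xs <;> simp [extMM]

theorem foldl_min_assoc (ys : List Int) (a b : Int) :
    ys.foldl min (min a b) = min a (ys.foldl min b) := by
  induction ys generalizing b with
  | nil => rfl
  | cons c ys ih => simp [List.foldl, min_assoc, ih]

theorem foldl_max_assoc (ys : List Int) (a b : Int) :
    ys.foldl max (max a b) = max a (ys.foldl max b) := by
  induction ys generalizing b with
  | nil => rfl
  | cons c ys ih => simp [List.foldl, max_assoc, ih]

theorem extMM_cons (x : Int) (l : List Int) :
    extMM (x :: l) = match extMM l with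
      | none => some (x, x)
      | some (p, q) => some (min x p, max x q) := by
  cases l with
  | nil => rfl
  | cons y ys => simp [extMM, foldl_min_assoc, foldl_max_assoc]

theorem extMM_append (l : List Int) (x : Int) :
    extMM (l ++ [x]) = match extMM l with
      | none => some (x, x)
      | some (p, q) => some (min p x, max q x) := by
  cases l with
  | nil => rfl
  | cons y ys => simp [extMM, List.foldl_append]

theorem length_sufB (xs : List Int) : (sufB xs).length = xs.length := by
  induction xs with
  | nil => rfl
  | cons x xs ih =>
      cases h : sufB xs with
      | nil =>
          rw [h] at ih; simp at ih
          simp [sufB, h, ← ih]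
      | cons p rest =>
          obtain ⟨mn, mx⟩ := p
          rw [h] at ih; simp at ih
          simp [sufB, h]; omega

theorem sufB_head_eq_extMM (xs : List Int) :
    (sufB xs)[0]? = extMM xs := by
  induction xs with
  | nil => rfl
  | cons x xs ih =>
      cases h : sufB xs with
      | nil =>
          have hlen : xs.length = 0 := by
            have := length_sufB xs; rw [h] at this; simpa using this.symm
          have hnil : xs = [] := List.length_eq_zero_iff.mp hlen
          subst hnil
          simp [sufB, extMM]
      | cons p rest =>
          obtain ⟨mn, mx⟩ := p
          have hx : extMM xs = some (mn, mx) := by rw [← ih, h]; rfl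
          simp [sufB, h, extMM_cons, hx]

theorem sufB_getElem (xs : List Int) (k : Nat) (hk : k < xs.length) :
    (sufB xs)[k]? = extMM (xs.drop k) := by
  induction xs generalizing k with
  | nil => simp at hk
  | cons x xs ih =>
      cases k with
      | zero => simpa using sufB_head_eq_extMM (x :: xs)
      | succ k =>
          have hk' : k < xs.length := by simpa using hk
          have tail : (sufB (x :: xs)).tail = sufB xs := by
            cases h : sufB xs with
            | nil => simp [sufB, h]
            | cons p rest => obtain ⟨mn, mx⟩ := p; simp [sufB, h]
          calc (sufB (x :: xs))[k+1]? = (sufB (x :: xs)).tail[k]? := by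
                cases hh : sufB (x :: xs) with
                | nil => simp
                | cons a t => simp
            _ = (sufB xs)[k]? := by rw [tail]
            _ = extMM (xs.drop k) := ih k hk'

theorem extMM_test_iff (l : List Int) (a v : Int) :
    (∃ pq : Int × Int, extMM l = some pq ∧ (a - pq.1 ≥ v ∨ pq.2 - a ≥ v)) ↔
      ∃ x ∈ l, |a - x| ≥ v := by
  cases l with
  | nil => simp [extMM]
  | cons x xs =>
      simp only [extMM]
      constructor
      · rintro ⟨⟨p, q⟩, hpq, hc⟩
        have hp : p = xs.foldl min x := by injection hpq with h; exact congrArg Prod.fst h.symm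
        have hq : q = xs.foldl max x := by injection hpq with h; exact congrArg Prod.snd h.symm
        rcases hc with hc | hc
        · refine ⟨p, ?_, ?_⟩
          · subst hp
            rcases PySem.List.foldl_min_mem xs x with h | h
            · rw [h]; exact List.mem_cons_self
            · exact List.mem_cons_of_mem _ h
          · calc v ≤ a - p := hc
              _ ≤ |a - p| := le_abs_self _
        · refine ⟨q, ?_, ?_⟩
          · subst hq
            rcases PySem.List.foldl_max_mem xs x with h | h
            · rw [h]; exact List.mem_cons_self
            · exact List.mem_cons_of_mem _ h
          · calc v ≤ q - a := hc
              _ = -(a - q) := by ring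
              _ ≤ |a - q| := neg_le_abs _
      · rintro ⟨y, hy, hv⟩
        refine ⟨(xs.foldl min x, xs.foldl max x), rfl, ?_⟩
        have hmin : xs.foldl min x ≤ y := by
          rcases List.mem_cons.mp hy with rfl | hy
          · exact (PySem.List.foldl_min_le xs y).1
          · exact (PySem.List.foldl_min_le xs x).2 y hy
        have hmax : y ≤ xs.foldl max x := by
          rcases List.mem_cons.mp hy with rfl | hy
          · exact (PySem.List.le_foldl_max xs y).1
          · exact (PySem.List.le_foldl_max xs x).2 y hy
        rcases abs_cases (a - y) with ⟨he, _⟩ | ⟨he, _⟩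
        · left; rw [he] at hv; omega
        · right; rw [he] at hv; omega

theorem exists_mem_take_iff (l : List Int) (m : Nat) (φ : Int → Prop) :
    (∃ x ∈ l.take m, φ x) ↔ ∃ k, ∃ _hk : k < l.length, k < m ∧ φ (l.get ⟨k, ‹_›⟩) := by
  constructor
  · rintro ⟨x, hx, hφ⟩
    obtain ⟨k, hk, rfl⟩ := List.mem_iff_getElem.mp hx
    have hkl : k < l.length := lt_of_lt_of_le hk (by simp [List.length_take])
    have hkm : k < m := lt_of_lt_of_le hk (by simp [List.length_take])
    refine ⟨k, hkl, hkm, ?_⟩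
    simpa [List.get_eq_getElem, List.getElem_take] using hφ
  · rintro ⟨k, hk, hkm, hφ⟩
    have hk' : k < (l.take m).length := by simp [List.length_take]; omega
    refine ⟨(l.take m)[k], List.getElem_mem hk', ?_⟩
    simpa [List.get_eq_getElem, List.getElem_take] using hφ

theorem exists_mem_drop_iff (l : List Int) (a : Nat) (φ : Int → Prop) :
    (∃ x ∈ l.drop a, φ x) ↔ ∃ k, ∃ _hk : k < l.length, a ≤ k ∧ φ (l.get ⟨k, ‹_›⟩) := by
  constructor
  · rintro ⟨x, hx, hφ⟩
    obtain ⟨k, hk, rfl⟩ := List.mem_iff_getElem.mp hx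
    have hkl : a + k < l.length := by
      have := hk; simp [List.length_drop] at this; omega
    refine ⟨a + k, hkl, by omega, ?_⟩
    simpa [List.get_eq_getElem, List.getElem_drop] using hφ
  · rintro ⟨k, hk, hka, hφ⟩
    have hk' : k - a < (l.drop a).length := by simp [List.length_drop]; omega
    refine ⟨(l.drop a)[k - a], List.getElem_mem hk', ?_⟩
    have : (l.drop a)[k - a] = l[a + (k - a)] := List.getElem_drop
    have hee : a + (k - a) = k := by omega
    simp only [List.get_eq_getElem] at hφ
    rw [this]
    simp only [hee]
    exact hφ

theorem window_index_iff (idxD : Int) (n s k : Nat) (_hs : s < n) (_hk : k < n) :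
    (k < s + 1 - (max idxD 0).toNat ∨
      s + (max idxD 0).toNat ≤ k) ↔ |(s:Int) - (k:Int)| ≥ idxD := by
  by_cases hpos : idxD > 0
  · have hm : max idxD 0 = idxD := by omega
    rw [hm]
    rcases abs_cases ((s:Int) - (k:Int)) with ⟨he, hge⟩ | ⟨he, hlt⟩ <;> rw [he] <;> omega
  · have hm : max idxD 0 = 0 := by omega
    rw [hm]
    constructor
    · intro _; exact le_trans (by omega) (abs_nonneg _)
    · intro _; omega

theorem exists_pair_iff (nums : List Int) (idxD v : Int) (s : Nat) (hs : s < nums.length) :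
    ((∃ x ∈ nums.take (s + 1 - (max idxD 0).toNat), |nums[s] - x| ≥ v)
      ∨ (∃ x ∈ nums.drop (s + (max idxD 0).toNat), |nums[s] - x| ≥ v))
    ↔ ∃ k, ∃ _hk : k < nums.length, |(s:Int) - (k:Int)| ≥ idxD ∧ |nums[s] - nums[k]| ≥ v := by
  rw [exists_mem_take_iff, exists_mem_drop_iff]
  constructor
  · rintro (⟨k, hk, hkm, hφ⟩ | ⟨k, hk, hka, hφ⟩)
    · exact ⟨k, hk, (window_index_iff idxD nums.length s k hs hk).mp (Or.inl hkm), hφ⟩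
    · exact ⟨k, hk, (window_index_iff idxD nums.length s k hs hk).mp (Or.inr hka), hφ⟩
  · rintro ⟨k, hk, hidx, hφ⟩
    rcases (window_index_iff idxD nums.length s k hs hk).mpr hidx with h | h
    · exact Or.inl ⟨k, hk, h, hφ⟩
    · exact Or.inr ⟨k, hk, h, hφ⟩

theorem hitBool_iff (nums : List Int) (idxD v d : Int) (s : Nat) (hs : s < nums.length)
    (hd : d = max idxD 0) :
    (((match extMM (nums.take (s + 1 - d.toNat)) with
       | none => false
       | some (p, q) => decide (nums[s] - p ≥ v) || decide (q - nums[s] ≥ v)) ||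
      (decide ((s:Int) + d < (nums.length:Int)) &&
        (decide (nums[s] - (PySem.List.pyGetD (sufB nums) ((s:Int) + d) (0, 0)).1 ≥ v) ||
         decide ((PySem.List.pyGetD (sufB nums) ((s:Int) + d) (0, 0)).2 - nums[s] ≥ v)))) = true)
    ↔ ∃ k, ∃ _hk : k < nums.length, |(s:Int) - (k:Int)| ≥ idxD ∧ |nums[s] - nums[k]| ≥ v := by
  have hd0 : 0 ≤ d := by rw [hd]; omega
  have hdt : (d.toNat : Int) = d := Int.toNat_of_nonneg hd0
  rw [← exists_pair_iff nums idxD v s hs]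
  have hdif : d.toNat = (max idxD 0).toNat := by rw [hd]
  rw [← hdif]
  have hleft : ((match extMM (nums.take (s + 1 - d.toNat)) with
       | none => false
       | some (p, q) => decide (nums[s] - p ≥ v) || decide (q - nums[s] ≥ v)) = true)
      ↔ ∃ x ∈ nums.take (s + 1 - d.toNat), |nums[s] - x| ≥ v := by
    rw [← extMM_test_iff]
    cases hmm : extMM (nums.take (s + 1 - d.toNat)) with
    | none => simp [hmm]
    | some pq => cases pq; simp [hmm]
  have hright : ((decide ((s:Int) + d < (nums.length:Int)) &&
        (decide (nums[s] - (PySem.List.pyGetD (sufB nums) ((s:Int) + d) (0, 0)).1 ≥ v) ||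
         decide ((PySem.List.pyGetD (sufB nums) ((s:Int) + d) (0, 0)).2 - nums[s] ≥ v))) = true)
      ↔ ∃ x ∈ nums.drop (s + d.toNat), |nums[s] - x| ≥ v := by
    by_cases hr : (s:Int) + d < (nums.length:Int)
    · have hrn : s + d.toNat < nums.length := by omega
      have hcast : (s:Int) + d = ((s + d.toNat : Nat) : Int) := by push_cast; omega
      have hget : PySem.List.pyGetD (sufB nums) ((s:Int) + d) (0, 0) =
          (sufB nums).getD (s + d.toNat) (0, 0) := by
        rw [hcast, PySem.List.pyGetD_natCast]
      have hsg : (sufB nums)[s + d.toNat]? = extMM (nums.drop (s + d.toNat)) :=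
        sufB_getElem nums (s + d.toNat) hrn
      rw [← extMM_test_iff]
      cases hmm : extMM (nums.drop (s + d.toNat)) with
      | none =>
          exfalso
          rw [extMM_eq_none_iff] at hmm
          have := List.drop_eq_nil_iff.mp hmm
          omega
      | some pq =>
          obtain ⟨p, q⟩ := pq
          have : PySem.List.pyGetD (sufB nums) ((s:Int) + d) (0, 0) = (p, q) := by
            rw [hget, List.getD_eq_getElem?_getD, hsg, hmm]; rfl
          rw [this]
          simp [hr, hmm]
    · have hdrop : nums.drop (s + d.toNat) = [] := by
        rw [List.drop_eq_nil_iff]; omega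
      simp [hr, hdrop]
  rw [← hleft, ← hright]
  simp only [Bool.or_eq_true]

theorem pre'_step (nums : List Int) (d : Int) (s : Nat) (hs : s < nums.length)
    (hd0 : 0 ≤ d) :
    (if (s:Int) - d ≥ 0 then
        match extMM (nums.take (s - d.toNat)) with
        | none => some (PySem.List.pyGetD nums ((s:Int) - d) 0, PySem.List.pyGetD nums ((s:Int) - d) 0)
        | some (p, q) => some (min p (PySem.List.pyGetD nums ((s:Int) - d) 0),
                               max q (PySem.List.pyGetD nums ((s:Int) - d) 0))
      else extMM (nums.take (s - d.toNat)))
    = extMM (nums.take (s + 1 - d.toNat)) := by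
  have hdt : (d.toNat : Int) = d := Int.toNat_of_nonneg hd0
  by_cases hge : (s:Int) - d ≥ 0
  · have hDs : d.toNat ≤ s := by omega
    rw [if_pos hge]
    have hidx : (s:Int) - d = ((s - d.toNat : Nat) : Int) := by push_cast; omega
    have hlt : s - d.toNat < nums.length := by omega
    have hget : PySem.List.pyGetD nums ((s:Int) - d) 0 = nums[s - d.toNat] := by
      rw [hidx, PySem.List.pyGetD_natCast, List.getD_eq_getElem?_getD,
        List.getElem?_eq_getElem hlt]; rfl
    have htake : nums.take (s + 1 - d.toNat) = nums.take (s - d.toNat) ++ [nums[s - d.toNat]] := by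
      have h1 : s + 1 - d.toNat = (s - d.toNat) + 1 := by omega
      rw [h1, List.take_succ, List.getElem?_eq_getElem hlt]; rfl
    rw [hget, htake, extMM_append]
  · rw [if_neg hge]
    have h1 : s - d.toNat = 0 := by omega
    have h2 : s + 1 - d.toNat = 0 := by omega
    rw [h1, h2]

theorem loopB_eq_outerA (nums : List Int) (idxD v : Int) (tail : List Int) :
    ∀ (s : Nat) (pre : Option (Int × Int)),
      nums.drop s = tail →
      pre = extMM (nums.take (s - (max idxD 0).toNat)) →
      loopB nums (sufB nums) idxD v (max idxD 0)
          (PySem.List.enumerate tail (s:Int)) pre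
        = outerA nums idxD v (PySem.List.enumerate tail (s:Int)) := by
  induction tail with
  | nil => intro s pre _ _; simp [PySem.List.enumerate_nil, loopB, outerA]
  | cons x tail ih =>
      intro s pre hdrop hpre
      have hd0 : 0 ≤ max idxD 0 := by omega
      have hdt : ((max idxD 0).toNat : Int) = max idxD 0 := Int.toNat_of_nonneg hd0
      have hs : s < nums.length := by
        by_contra h
        rw [List.drop_eq_nil_iff.mpr (by omega)] at hdrop
        exact absurd hdrop (by simp)
      have hx : nums[s] = x := by
        have h0 : nums[s]? = some x := by
          calc nums[s]? = nums[s + 0]? := by rw [Nat.add_zero]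
            _ = (nums.drop s)[0]? := List.getElem?_drop.symm
            _ = some x := by rw [hdrop]; rfl
        simpa [List.getElem?_eq_getElem hs] using h0
      have hdrop' : nums.drop (s + 1) = tail := by
        rw [← List.tail_drop, hdrop]; rfl
      simp only [PySem.List.enumerate_cons, loopB, outerA]
      rw [hpre, ← hx]
      rw [pre'_step nums (max idxD 0) s hs hd0]
      by_cases hE : ∃ k, ∃ _hk : k < nums.length,
          |(s:Int) - (k:Int)| ≥ idxD ∧ |nums[s] - nums[k]| ≥ v
      · rw [if_pos ((hitBool_iff nums idxD v (max idxD 0) s hs rfl).mpr hE)]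
        have hne : innerA (s:Int) nums[s] idxD v (PySem.List.enumerate nums 0) ≠ none := by
          intro hI
          obtain ⟨k, hk, hcond⟩ := hE
          have hall := (innerA_eq_none_iff _ _ _ _ _).mp hI
          have hmem : ((k:Int), nums[k]) ∈ PySem.List.enumerate nums 0 := by
            rw [PySem.List.mem_enumerate_iff]
            exact ⟨k, hk, by simp⟩
          exact hall _ hmem hcond
        rw [innerA_ne_none_fp _ _ _ _ _ hne]
        have hai : PySem.List.pyGetD nums (s:Int) 0 = nums[s] := by
          rw [PySem.List.pyGetD_natCast, List.getD_eq_getElem?_getD,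
            List.getElem?_eq_getElem hs]; rfl
        simp [firstPartner, hai]
      · rw [if_neg (fun h =>
          hE ((hitBool_iff nums idxD v (max idxD 0) s hs rfl).mp h))]
        have hI : innerA (s:Int) nums[s] idxD v (PySem.List.enumerate nums 0) = none := by
          rw [innerA_eq_none_iff]
          rintro ⟨j, aj⟩ hmem ⟨h1, h2⟩
          rw [PySem.List.mem_enumerate_iff] at hmem
          obtain ⟨k, hk, hpk⟩ := hmem
          apply hE
          obtain ⟨ha, hb⟩ : j = (k:Int) ∧ aj = nums[k] := by
            constructor
            · injection hpk with u _; omega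
            · injection hpk
          exact ⟨k, hk, ha ▸ h1, hb ▸ h2⟩
        rw [hI]
        have hcast : (s:Int) + 1 = ((s + 1 : Nat) : Int) := by push_cast; ring
        rw [hcast]
        exact ih (s + 1) _ hdrop' rfl

-- ===== VERDICT (by name: the statement is the Claim_ definition above) =====
theorem findIndices_spec : Claim_equal_findIndices := by
  intro nums idxD v _
  unfold Spec_findIndices findIndices findIndices_alt
  exact (loopB_eq_outerA nums idxD v nums 0 none (by simp) (by simp [extMM])).symm
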